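-- pv_equiv track=rewrite | github.com/SimCini/python | Ciniltani_vendite.py | venditaMax
-- ===== SOURCE A (Python) =====
-- def venditaMax(tVendite):
--     importi = []
--     prodottiMax=[]
--     for (reparto,categoria),(prodotto,(tipPagamento,importo)) in tVendite:
--         importi.append(importo)
--     impMax=max(importi)
--     for (reparto,categoria),(prodotto,(tipPagamento,importo)) in tVendite:
--         if importo==impMax:
--             prodottiMax.append(prodotto)
--     return (impMax,(prodottiMax))
-- ===== SOURCE B (Python) =====
-- def venditaMax(tVendite):
--     # single pass: keep the running maximum and the products achieving it
--     best = None
--     prodottiMax = []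
--     for (reparto, categoria), (prodotto, (tipPagamento, importo)) in tVendite:
--         if best is None or importo > best:
--             best = importo
--             prodottiMax = [prodotto]
--         elif importo == best:
--             prodottiMax.append(prodotto)
--     if best is None:
--         raise ValueError("max() arg is an empty sequence")
--     return (best, prodottiMax)
-- ===== Notes on version B (the rewrite author's own statement) =====
-- stated objective: alternative
-- what changed: Replaced A's two sequential scans (collect all importi, take max, then rescan to filter products) by a single pass that maintains the running maximum and the list of products achieving it, resetting the list whenever a larger importo appears.
import Mathlib
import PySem

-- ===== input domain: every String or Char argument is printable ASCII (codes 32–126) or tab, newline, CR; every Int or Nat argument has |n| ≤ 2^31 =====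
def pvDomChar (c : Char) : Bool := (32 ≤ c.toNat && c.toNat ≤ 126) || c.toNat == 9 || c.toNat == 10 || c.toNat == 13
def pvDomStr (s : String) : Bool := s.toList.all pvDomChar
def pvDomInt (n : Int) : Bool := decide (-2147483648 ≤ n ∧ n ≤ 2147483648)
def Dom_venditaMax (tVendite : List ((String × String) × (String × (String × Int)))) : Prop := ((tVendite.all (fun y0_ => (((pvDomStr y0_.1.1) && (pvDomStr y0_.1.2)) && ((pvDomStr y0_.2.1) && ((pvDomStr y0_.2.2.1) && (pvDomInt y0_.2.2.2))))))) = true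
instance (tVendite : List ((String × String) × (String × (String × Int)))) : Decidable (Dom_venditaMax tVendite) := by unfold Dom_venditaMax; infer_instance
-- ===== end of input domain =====

-- B changes the structure only: one pass with a running maximum instead of A's two scans; same value everywhere A returns (Pre_ excludes the empty list, where A raises ValueError).

-- ===== PORT A =====
def venditaMax (tVendite : List ((String × String) × (String × (String × Int)))) : Int × List String :=
  let importi := tVendite.foldl (fun acc x => acc ++ [x.2.2.2]) ([] : List Int)
  match PySem.List.max? importi (fun y => y) with
  | none => (0, [])            -- Python: max([]) raises ValueError; excluded by Pre_
  | some impMax =>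
    let prodottiMax := tVendite.foldl
      (fun acc x => if x.2.2.2 == impMax then acc ++ [x.2.1] else acc) ([] : List String)
    (impMax, prodottiMax)

-- ===== PORT B =====
def pvStep (st : Option Int × List String) (x : (String × String) × (String × (String × Int))) :
    Option Int × List String :=
  match st.1 with
  | none => (some x.2.2.2, [x.2.1])
  | some b =>
    if x.2.2.2 > b then (some x.2.2.2, [x.2.1])
    else if x.2.2.2 == b then (some b, st.2 ++ [x.2.1])
    else st

def venditaMax_alt (tVendite : List ((String × String) × (String × (String × Int)))) : Int × List String :=
  let st := tVendite.foldl pvStep (none, [])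
  match st.1 with
  | none => (0, [])            -- Python: raise ValueError; excluded by Pre_
  | some b => (b, st.2)

-- ===== PRECONDITION & SPEC =====
-- Pre_ excludes only the empty list, on which A (via max([])) and B both raise ValueError.
def Pre_venditaMax (tVendite : List ((String × String) × (String × (String × Int)))) : Prop :=
  tVendite ≠ []
instance (tVendite : List ((String × String) × (String × (String × Int)))) : Decidable (Pre_venditaMax tVendite) := by unfold Pre_venditaMax; infer_instance

def pvWitness_venditaMax : (List ((String × String) × (String × (String × Int)))) :=
  [(("alimentari", "frutta"), ("mele", ("contanti", 3)))]

def Spec_venditaMax (tVendite : List ((String × String) × (String × (String × Int)))) (out : Int × List String) : Prop := out = venditaMax_alt tVendite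
instance (tVendite : List ((String × String) × (String × (String × Int)))) (out : Int × List String) : Decidable (Spec_venditaMax tVendite out) := by unfold Spec_venditaMax; infer_instance

-- ===== CLAIM (what is proved, stated in full; the proofs are below) =====
def Claim_equal_venditaMax : Prop := ∀ (tVendite : List ((String × String) × (String × (String × Int)))), Dom_venditaMax tVendite → Pre_venditaMax tVendite → Spec_venditaMax tVendite (venditaMax tVendite)

-- ===== LEMMAS AND PROOFS =====

def pvImp (x : (String × String) × (String × (String × Int))) : Int := x.2.2.2
def pvPrd (x : (String × String) × (String × (String × Int))) : String := x.2.1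
def pvM (l : List ((String × String) × (String × (String × Int)))) (b : Int) : Int :=
  l.foldl (fun m x => max m (pvImp x)) b

lemma le_pvM (l : List ((String × String) × (String × (String × Int)))) (b : Int) : b ≤ pvM l b :=
  (PySem.List.le_foldl_max_int l pvImp b).1

-- loop invariant of B's single pass, started after the first element
lemma foldB_inv (l : List ((String × String) × (String × (String × Int)))) (b : Int) (ps : List String) :
    l.foldl pvStep (some b, ps) =
      (some (pvM l b),
       (if pvM l b = b then ps else []) ++ (l.filter (fun x => pvImp x == pvM l b)).map pvPrd) := by
  induction l generalizing b ps with
  | nil => simp [pvM]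
  | cons x l ih =>
    rcases lt_trichotomy b (pvImp x) with h | h | h
    · have h' : x.2.2.2 > b := h
      have hstep : pvStep (some b, ps) x = (some (pvImp x), [pvPrd x]) := by
        simp [pvStep, h', pvImp, pvPrd]
      have hM : pvM (x :: l) b = pvM l (pvImp x) := by
        simp [pvM, max_eq_right (le_of_lt h)]
      have hne : pvM l (pvImp x) ≠ b := by
        have := le_pvM l (pvImp x); omega
      rw [List.foldl_cons, hstep, ih]
      simp only [hM, if_neg hne, List.filter_cons, List.nil_append]
      by_cases hx : pvImp x = pvM l (pvImp x)
      · have hx' : (pvImp x == pvM l (pvImp x)) = true := by simpa using hx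
        simp [← hx]
      · have hx' : (pvImp x == pvM l (pvImp x)) = false := by simpa using hx
        rw [if_neg (fun hh => hx hh.symm)]
        simp [hx']
    · have h' : x.2.2.2 = b := h.symm
      have hstep : pvStep (some b, ps) x = (some b, ps ++ [pvPrd x]) := by
        simp [pvStep, h', pvPrd]
      have hM : pvM (x :: l) b = pvM l b := by
        simp [pvM, ← h]
      rw [List.foldl_cons, hstep, ih]
      simp only [hM, List.filter_cons]
      by_cases hb : pvM l b = b
      · have hx : (pvImp x == pvM l b) = true := by simp [pvImp, h', hb]
        simp [hb, pvPrd, pvImp, h']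
      · have hx : (pvImp x == pvM l b) = false := by simp [pvImp, h']; omega
        simp [hb, hx]
    · have h1 : ¬ (x.2.2.2 > b) := by have : pvImp x < b := h; simp [pvImp] at this; omega
      have h2 : (x.2.2.2 == b) = false := by
        have : pvImp x < b := h; simp [pvImp] at this; simp; omega
      have hstep : pvStep (some b, ps) x = (some b, ps) := by
        simp [pvStep, h1, h2]
      have hM : pvM (x :: l) b = pvM l b := by
        simp [pvM, max_eq_left (le_of_lt h)]
      rw [List.foldl_cons, hstep, ih]
      have hble : b ≤ pvM l b := le_pvM l b
      have hx : (pvImp x == pvM l b) = false := by simp; omega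
      simp [hM, hx]

-- A's first loop builds the list of importi
lemma importi_eq (t : List ((String × String) × (String × (String × Int)))) :
    t.foldl (fun acc x => acc ++ [x.2.2.2]) ([] : List Int) = t.map pvImp := by
  simpa using PySem.List.foldl_append_singleton_eq_map (l := t) (f := fun x => x.2.2.2) (acc := [])

lemma maxA_eq (x : (String × String) × (String × (String × Int)))
    (l : List ((String × String) × (String × (String × Int)))) :
    PySem.List.max? ((x :: l).map pvImp) (fun y => y) = some (pvM l (pvImp x)) := by
  rw [List.map_cons, PySem.List.max?_id_cons, List.foldl_map]
  rfl

theorem venditaMax_eq_alt (t : List ((String × String) × (String × (String × Int))))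
    (h : t ≠ []) : venditaMax t = venditaMax_alt t := by
  obtain ⟨x, l, rfl⟩ := List.exists_cons_of_ne_nil h
  have hM := maxA_eq x l
  have hB : (x :: l).foldl pvStep (none, []) =
      (some (pvM l (pvImp x)),
       (if pvM l (pvImp x) = pvImp x then [pvPrd x] else []) ++
         (l.filter (fun y => pvImp y == pvM l (pvImp x))).map pvPrd) := by
    have hstep : pvStep (none, ([] : List String)) x = (some (pvImp x), [pvPrd x]) := by
      simp [pvStep, pvImp, pvPrd]
    rw [List.foldl_cons, hstep, foldB_inv]
  unfold venditaMax venditaMax_alt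
  rw [importi_eq]
  dsimp only
  rw [hM, hB]
  dsimp only
  rw [PySem.List.foldl_append_if]
  rw [List.filter_cons]
  by_cases hx : pvImp x = pvM l (pvImp x)
  · have hx' : (x.2.2.2 == pvM l (pvImp x)) = true := by simpa [pvImp] using hx
    rw [if_pos hx.symm]
    simp [pvPrd, pvImp]
    rw [if_pos (show x.2.2.2 = pvM l x.2.2.2 from hx)]
    simp [pvPrd]
  · have hx' : (x.2.2.2 == pvM l (pvImp x)) = false := by simpa [pvImp] using hx
    simp only [hx', Bool.false_eq_true, if_false]
    rw [if_neg (fun hh => hx hh.symm)]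
    simp [pvPrd, pvImp]

-- ===== VERDICT (by name: the statement is the Claim_ definition above) =====
theorem venditaMax_spec : Claim_equal_venditaMax := by
  intro t _ hpre
  exact venditaMax_eq_alt t hpre
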